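-- pv_equiv track=rewrite | github.com/jorgenriseth/gonzo | src/brainmeshing/utils.py | expand_subdomain_string
-- ===== SOURCE A (Python) =====
-- from typing import Literal
--
-- def replace_at_index(s: str, idx: int, value: Literal["0", "1"]) -> str:
--     return s[:idx] + value + s[idx + 1 :]
--
-- def expand_subdomain_string(smap_string: str) -> list[str]:
--     idx = smap_string.find(".")
--     if idx == -1:
--         return [smap_string]
--     else:
--         return expand_subdomain_string(
--             replace_at_index(smap_string, idx, "0")
--         ) + expand_subdomain_string(replace_at_index(smap_string, idx, "1"))
-- ===== SOURCE B (Python) =====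
-- def expand_subdomain_string(smap_string: str) -> list[str]:
--     results = [""]
--     for c in smap_string:
--         if c == ".":
--             results = [r + b for r in results for b in "01"]
--         else:
--             results = [r + c for r in results]
--     return results
-- ===== Notes on version B (the rewrite author's own statement) =====
-- stated objective: idiomatic
-- what changed: Replaces A's recursive substitute-first-dot-and-recurse expansion with a single left-to-right fold over the characters that extends the whole list of partial strings at once (doubling it at each '.'), which yields the same binary-counting order.
import Mathlib
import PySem

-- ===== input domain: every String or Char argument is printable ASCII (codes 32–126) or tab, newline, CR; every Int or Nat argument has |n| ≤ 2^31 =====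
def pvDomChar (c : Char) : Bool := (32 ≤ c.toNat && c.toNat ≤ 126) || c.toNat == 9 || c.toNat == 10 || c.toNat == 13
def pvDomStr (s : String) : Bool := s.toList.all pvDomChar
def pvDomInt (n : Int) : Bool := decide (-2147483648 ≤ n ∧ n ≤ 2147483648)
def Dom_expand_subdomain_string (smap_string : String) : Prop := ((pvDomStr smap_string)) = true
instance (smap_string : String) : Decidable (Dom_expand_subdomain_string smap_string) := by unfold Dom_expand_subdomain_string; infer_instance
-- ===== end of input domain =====

-- B replaces A's recursive first-dot substitution by a single left-to-right fold that
-- extends all partial strings at once (idiomatic, one pass; same output order).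


-- ===== PORT A =====
-- s[:idx] + value + s[idx+1:]
def replace_at_index (s : String) (idx : Int) (value : String) : String :=
  String.ofList (PySem.Chars.slice s.toList none (some idx) ++ value.toList
      ++ PySem.Chars.slice s.toList (some (idx + 1)) none)

-- structure of the string at the first found '.' (shared by the termination lemma and the proofs)
theorem find_dot_structure (s : String) (h : ¬ PySem.Str.find s "." = -1) :
    0 ≤ PySem.Str.find s "." ∧
    (PySem.Str.find s ".").toNat < s.toList.length ∧
    '.' ∉ s.toList.take (PySem.Str.find s ".").toNat ∧
    s.toList = s.toList.take (PySem.Str.find s ".").toNat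
        ++ '.' :: s.toList.drop ((PySem.Str.find s ".").toNat + 1) := by
  have hdot : (".").toList = ['.'] := by decide
  have hfind : PySem.Str.find s "." = PySem.Chars.find s.toList ['.'] := by
    simp [PySem.Str.find_eq, hdot]
  set cs := s.toList with hcs
  rw [hfind] at h ⊢
  set i := PySem.Chars.find cs ['.'] with hi
  have h0 : 0 ≤ i := by
    have := PySem.Chars.neg_one_le_find cs ['.']
    omega
  have hspec := PySem.Chars.find_spec (s := cs) (sub := ['.']) (by rw [← hi]; exact h0)
  rw [← hi] at hspec
  obtain ⟨t, ht⟩ := hspec.1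
  have hn : i.toNat < cs.length := by
    by_contra hge
    have : cs.drop i.toNat = [] := List.drop_eq_nil_of_le (by omega)
    rw [this] at ht; simp at ht
  have htail : cs.drop (i.toNat + 1) = t := by
    have h2 := congrArg (List.drop 1) ht
    simpa [List.drop_drop, Nat.add_comm] using h2.symm
  refine ⟨h0, hn, ?_, ?_⟩
  · intro hm
    obtain ⟨j, hj, hjv⟩ := List.getElem_of_mem hm
    have hlt : (cs.take i.toNat).length = min i.toNat cs.length := List.length_take
    have hjn : j < i.toNat := by omega
    have hjlen : j < cs.length := by omega
    refine hspec.2 j hjn ⟨cs.drop (j + 1), ?_⟩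
    rw [List.drop_eq_getElem_cons hjlen]
    have : cs[j] = '.' := by rw [← hjv]; simp [List.getElem_take]
    simp [this]
  · conv_lhs => rw [← List.take_append_drop i.toNat cs]
    rw [← ht, htail]
    simp

-- the replaced string, as a list of characters
theorem replace_toList (s : String) (v : String) (h0 : 0 ≤ PySem.Str.find s ".") :
    (replace_at_index s (PySem.Str.find s ".") v).toList
      = s.toList.take (PySem.Str.find s ".").toNat ++ v.toList
          ++ s.toList.drop ((PySem.Str.find s ".").toNat + 1) := by
  unfold replace_at_index
  rw [PySem.Chars.slice_eq_listSlice, PySem.Chars.slice_eq_listSlice,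
    PySem.List.slice_to s.toList h0,
    PySem.List.slice_from s.toList (by omega : (0 : Int) ≤ PySem.Str.find s "." + 1)]
  have h1 : (PySem.Str.find s "." + 1).toNat = (PySem.Str.find s ".").toNat + 1 := by omega
  rw [h1]
  simp

-- termination lemma for the port's recursion: replacing the found '.' lowers the dot count
theorem count_replace_lt (s : String) (h : ¬ PySem.Str.find s "." = -1) (v : String)
    (hv : '.' ∉ v.toList) :
    (replace_at_index s (PySem.Str.find s ".") v).toList.count '.' < s.toList.count '.' := by
  obtain ⟨h0, hn, hp, hdecomp⟩ := find_dot_structure s h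
  rw [replace_toList s v h0]
  conv_rhs => rw [hdecomp]
  simp [List.count_append, List.count_eq_zero_of_not_mem hv]

def expand_subdomain_string (smap_string : String) : List String :=
  let idx := PySem.Str.find smap_string "."
  if h : idx = -1 then [smap_string]
  else
    expand_subdomain_string (replace_at_index smap_string idx "0")
      ++ expand_subdomain_string (replace_at_index smap_string idx "1")
termination_by smap_string.toList.count '.'
decreasing_by
  · exact count_replace_lt smap_string h "0" (by decide)
  · exact count_replace_lt smap_string h "1" (by decide)

-- ===== PORT B =====
def expand_subdomain_string_alt (smap_string : String) : List String :=
  (smap_string.toList.foldl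
    (fun results c =>
      if c = '.' then results.flatMap (fun r => ("01".toList).map (fun b => r ++ [b]))
      else results.map (fun r => r ++ [c]))
    [[]]).map String.ofList

-- ===== PRECONDITION & SPEC =====
def Spec_expand_subdomain_string (smap_string : String) (out : List String) : Prop := out = expand_subdomain_string_alt smap_string
instance (smap_string : String) (out : List String) : Decidable (Spec_expand_subdomain_string smap_string out) := by unfold Spec_expand_subdomain_string; infer_instance

-- ===== CLAIM (what is proved, stated in full; the proofs are below) =====
def Claim_equal_expand_subdomain_string : Prop := ∀ (smap_string : String), Dom_expand_subdomain_string smap_string → Spec_expand_subdomain_string smap_string (expand_subdomain_string smap_string)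

-- ===== LEMMAS AND PROOFS =====

-- the common characterisation: expand the string left-to-right, doubling at each '.'
def pvE : List Char → List (List Char)
  | [] => [[]]
  | c :: cs =>
      if c = '.' then (pvE cs).map ('0' :: ·) ++ (pvE cs).map ('1' :: ·)
      else (pvE cs).map (c :: ·)

theorem pvE_no_dot (cs : List Char) (h : '.' ∉ cs) : pvE cs = [cs] := by
  induction cs with
  | nil => rfl
  | cons c cs ih =>
      simp only [List.mem_cons, not_or] at h
      simp [pvE, Ne.symm h.1, ih h.2]

theorem pvE_append_nodot (p u : List Char) (hp : '.' ∉ p) :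
    pvE (p ++ u) = (pvE u).map (p ++ ·) := by
  induction p with
  | nil => simp
  | cons a p ih =>
      simp only [List.mem_cons, not_or] at hp
      simp [pvE, Ne.symm hp.1, ih hp.2, List.map_map, Function.comp_def]

theorem pvA_nodot (s : String) (hfound : PySem.Str.find s "." = -1) :
    [s] = (pvE s.toList).map String.ofList := by
  have hdot : (".").toList = ['.'] := by decide
  have hninf : ¬ (['.'] <:+: s.toList) := by
    rw [← PySem.Chars.find_eq_neg_one_iff]
    simpa [PySem.Str.find_eq, hdot] using hfound
  have hmem : '.' ∉ s.toList := by
    intro hm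
    obtain ⟨l₁, l₂, hl⟩ := List.append_of_mem hm
    exact hninf ⟨l₁, l₂, by simp [hl]⟩
  rw [pvE_no_dot _ hmem]
  simp

theorem pvA_eq_aux (k : Nat) :
    ∀ s : String, s.toList.count '.' ≤ k →
      expand_subdomain_string s = (pvE s.toList).map String.ofList := by
  induction k with
  | zero =>
      intro s hs
      rw [expand_subdomain_string]
      split
      · next hfound => exact pvA_nodot s hfound
      · next hfound =>
          exfalso
          have := count_replace_lt s hfound "0" (by decide)
          omega
  | succ k ih =>
      intro s hs
      rw [expand_subdomain_string]
      split
      · next hfound => exact pvA_nodot s hfound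
      · next hfound =>
          have hlt0 := count_replace_lt s hfound "0" (by decide)
          have hlt1 := count_replace_lt s hfound "1" (by decide)
          obtain ⟨h0, hn, hp, hdecomp⟩ := find_dot_structure s hfound
          rw [ih _ (by omega), ih _ (by omega),
            replace_toList s "0" h0, replace_toList s "1" h0]
          have h0s : ("0").toList = ['0'] := by decide
          have h1s : ("1").toList = ['1'] := by decide
          conv_rhs => rw [hdecomp]
          rw [h0s, h1s,
            show s.toList.take (PySem.Str.find s ".").toNat ++ ['0']
                ++ s.toList.drop ((PySem.Str.find s ".").toNat + 1)
              = s.toList.take (PySem.Str.find s ".").toNat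
                ++ (['0'] ++ s.toList.drop ((PySem.Str.find s ".").toNat + 1)) from by simp,
            show s.toList.take (PySem.Str.find s ".").toNat ++ ['1']
                ++ s.toList.drop ((PySem.Str.find s ".").toNat + 1)
              = s.toList.take (PySem.Str.find s ".").toNat
                ++ (['1'] ++ s.toList.drop ((PySem.Str.find s ".").toNat + 1)) from by simp,
            pvE_append_nodot _ _ hp, pvE_append_nodot _ _ hp, pvE_append_nodot _ _ hp]
          simp [pvE, List.map_map, Function.comp_def]

theorem pvA_eq (s : String) :
    expand_subdomain_string s = (pvE s.toList).map String.ofList :=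
  pvA_eq_aux (s.toList.count '.') s le_rfl

theorem pvB_fold (cs : List Char) (res : List (List Char)) :
    cs.foldl
      (fun results c =>
        if c = '.' then results.flatMap (fun r => ("01".toList).map (fun b => r ++ [b]))
        else results.map (fun r => r ++ [c]))
      res = res.flatMap (fun r => (pvE cs).map (r ++ ·)) := by
  induction cs generalizing res with
  | nil => simp [pvE]
  | cons c cs ih =>
      rw [List.foldl_cons, ih]
      by_cases hc : c = '.'
      · subst hc
        have h01 : ("01").toList = ['0', '1'] := by decide
        simp only [h01, reduceIte]
        rw [List.flatMap_assoc]
        congr 1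
        funext r
        simp [pvE, List.map_map, Function.comp_def]
      · simp only [if_neg hc, List.flatMap_map]
        congr 1
        funext r
        simp [pvE, hc, List.map_map, Function.comp_def, List.append_assoc]

theorem pvB_eq (s : String) :
    expand_subdomain_string_alt s = (pvE s.toList).map String.ofList := by
  unfold expand_subdomain_string_alt
  rw [pvB_fold]
  simp

-- ===== VERDICT (by name: the statement is the Claim_ definition above) =====
theorem expand_subdomain_string_spec : Claim_equal_expand_subdomain_string := by
  intro s _
  unfold Spec_expand_subdomain_string
  rw [pvA_eq, pvB_eq]
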